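-- pv_equiv track=rewrite | github.com/shrey199325/LeetCodeSolution | InterviewQuestions/PureNumbers.py | Solve
-- ===== SOURCE A (Python) =====
-- def Solve (N):
--     # your code goes here
--     arr, i, start = ["44","55"], 2, 1
--     if i>=N:
--         return arr[N-1]
--     while i<N:
--         start = i
--         temp = ["4" + a + "4" for a in arr]
--         if i+len(temp)>=N:
--             arr=temp
--             break
--         temp += ["5" + a + "5" for a in arr]
--         i += len(temp)
--         arr = temp
--     return arr[N-start-1]
-- ===== SOURCE B (Python) =====
-- def Solve(N):
--     # Closed-form: find the level L (block of 2**L strings of length 2*L),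
--     # then decode the 0-based position p inside the level as an L-bit binary
--     # number whose bits (MSB = outermost wrap) choose '4' or '5'; the pure
--     # number is that half followed by its mirror image.
--     L, total = 1, 2            # total = number of pure numbers up to level L
--     while total < N:
--         L += 1
--         total += 2 ** L
--     p = N - (total - 2 ** L) - 1
--     half = ""
--     for _ in range(L):
--         half = ("5" if p % 2 == 1 else "4") + half
--         p //= 2
--     return half + half[::-1]
-- ===== Notes on version B (the rewrite author's own statement) =====
-- stated objective: faster
-- what changed: A materialises every level of pure numbers up to the N-th (lists of ~N strings); B finds the level by summing powers of two and builds only the answer, decoding the in-level position's binary digits into the '4'/'5' half and mirroring it.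
-- outside the precondition, e.g. on Solve(-2): A raises IndexError, B returns '55'
import Mathlib
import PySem

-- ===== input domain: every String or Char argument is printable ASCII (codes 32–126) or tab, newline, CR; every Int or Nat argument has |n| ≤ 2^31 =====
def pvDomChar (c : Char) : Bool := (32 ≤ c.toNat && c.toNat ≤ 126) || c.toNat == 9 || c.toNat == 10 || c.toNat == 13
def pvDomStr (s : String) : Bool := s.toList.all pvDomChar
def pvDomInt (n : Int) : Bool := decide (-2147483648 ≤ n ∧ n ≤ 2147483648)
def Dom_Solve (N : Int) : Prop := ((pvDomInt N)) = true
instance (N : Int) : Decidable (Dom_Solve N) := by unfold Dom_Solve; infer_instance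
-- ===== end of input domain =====

-- B replaces A's level-by-level generation of all pure numbers up to the N-th
-- (O(N) strings built) by decoding N into its level L and in-level position p,
-- and building the single answer from p's binary digits ('4'/'5' halves mirrored).

-- ===== PORT A =====
-- A's while loop; the `arr ≠ []` conjunct of the guard only makes the recursion total
-- (on an empty arr Python's loop would not terminate; arr is never empty in any run).
def solveLoopA (N : Int) (arr : List String) (i start : Int) : List String × Int :=
  if h : i < N ∧ arr ≠ [] then -- h is cited by the decreasing_by proof
    let temp := arr.map (fun a => "4" ++ a ++ "4")
    if i + (temp.length : Int) ≥ N then (temp, i)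
    else
      let temp2 := temp ++ arr.map (fun a => "5" ++ a ++ "5")
      solveLoopA N temp2 (i + (temp2.length : Int)) i
  else (arr, start)
termination_by (N - i).toNat
decreasing_by
  have h1 : 1 ≤ arr.length := List.length_pos_iff.mpr h.2
  simp only [List.length_append, List.length_map, List.length_attach]
  omega

def Solve (N : Int) : String :=
  if (2 : Int) ≥ N then (PySem.List.pyGet? ["44", "55"] (N - 1)).getD ""
  else
    let r := solveLoopA N ["44", "55"] 2 1
    (PySem.List.pyGet? r.1 (N - r.2 - 1)).getD ""

-- ===== PORT B =====
-- B's level-search loop: while total < N: L += 1; total += 2**L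
def findLevel (N : Int) (L : Nat) (total : Int) : Nat × Int :=
  if total < N then findLevel N (L + 1) (total + 2 ^ (L + 1)) else (L, total)
termination_by (N - total).toNat
decreasing_by
  have h2 : (0 : Int) < 2 ^ (L + 1) := by positivity
  omega

def Solve_alt (N : Int) : String :=
  let r := findLevel N 1 2
  let p := N - (r.2 - 2 ^ r.1) - 1
  let st := (List.range r.1).foldl
    (fun (st : String × Int) _ =>
      ((if PySem.Int.mod st.2 2 == 1 then "5" else "4") ++ st.1, PySem.Int.floordiv st.2 2))
    ("", p)
  st.1 ++ (PySem.Str.slice? st.1 none none (-1)).getD ""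

-- ===== PRECONDITION & SPEC =====
-- Pre_ excludes exactly N ≤ -2, where A raises IndexError (arr[N-1] on a 2-element list).
def Pre_Solve (N : Int) : Prop := -1 ≤ N
instance (N : Int) : Decidable (Pre_Solve N) := by unfold Pre_Solve; infer_instance
def pvWitness_Solve : Int := 5

def Spec_Solve (N : Int) (out : String) : Prop := out = Solve_alt N
instance (N : Int) (out : String) : Decidable (Spec_Solve N out) := by unfold Spec_Solve; infer_instance

-- ===== CLAIM (what is proved, stated in full; the proofs are below) =====
def Claim_equal_Solve : Prop := ∀ (N : Int), Dom_Solve N → Pre_Solve N → Spec_Solve N (Solve N)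

-- ===== LEMMAS AND PROOFS =====

-- the level-k block of pure numbers (level k has 2^(k+1) strings)
def lvl : Nat → List String
  | 0 => ["44", "55"]
  | k + 1 => (lvl k).map (fun a => "4" ++ a ++ "4") ++ (lvl k).map (fun a => "5" ++ a ++ "5")

lemma lvl_length (k : Nat) : (lvl k).length = 2 ^ (k + 1) := by
  induction k with
  | zero => rfl
  | succ k ih => simp [lvl, ih]; ring

lemma lvl_ne_nil (k : Nat) : lvl k ≠ [] := by
  have := lvl_length k
  intro h; rw [h] at this; simp at this
  exact absurd this.symm (Nat.two_pow_pos (k + 1)).ne'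

-- the half-word of a position p, built LSB-first (as B's loop does)
def hc (p : Int) : Nat → List Char
  | 0 => []
  | k + 1 => hc (PySem.Int.floordiv p 2) k ++ [if PySem.Int.mod p 2 == 1 then '5' else '4']

-- MSB-first recursion for hc, matching how lvl wraps
lemma hc_msb (k : Nat) : ∀ p : Int, 0 ≤ p → p < 2 ^ (k + 1) →
    hc p (k + 1) = (if p < 2 ^ k then '4' else '5') ::
      hc (if p < 2 ^ k then p else p - 2 ^ k) k := by
  induction k with
  | zero =>
    intro p h0 h1
    interval_cases p <;> decide
  | succ k ih =>
    intro p h0 h1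
    have hpow : (2 : Int) ^ (k + 1) = 2 * 2 ^ k := by ring
    have hpow2 : (2 : Int) ^ (k + 2) = 2 * 2 ^ (k + 1) := by ring
    have hfd : PySem.Int.floordiv p 2 = p / 2 := PySem.Int.floordiv_eq_ediv_of_pos (by norm_num)
    have hd0 : 0 ≤ p / 2 := by omega
    have hd1 : p / 2 < 2 ^ (k + 1) := by omega
    show hc (PySem.Int.floordiv p 2) (k + 1) ++ _ = _
    rw [hfd, ih (p / 2) hd0 hd1]
    by_cases hp : p < 2 ^ (k + 1)
    · have hq : p / 2 < 2 ^ k := by omega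
      simp only [hp, hq, if_true]
      show _ = _ :: (hc (PySem.Int.floordiv p 2) k ++ _)
      rw [hfd]
      rfl
    · have hq : ¬ p / 2 < 2 ^ k := by omega
      simp only [hp, hq, if_false]
      show _ = _ :: (hc (PySem.Int.floordiv (p - 2 ^ (k + 1)) 2) k ++
        [if PySem.Int.mod (p - 2 ^ (k + 1)) 2 == 1 then '5' else '4'])
      have hfd2 : PySem.Int.floordiv (p - 2 ^ (k + 1)) 2 = (p - 2 ^ (k + 1)) / 2 :=
        PySem.Int.floordiv_eq_ediv_of_pos (by norm_num)
      have hdiv : (p - 2 ^ (k + 1)) / 2 = p / 2 - 2 ^ k := by omega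
      have hmod : PySem.Int.mod (p - 2 ^ (k + 1)) 2 = PySem.Int.mod p 2 := by
        rw [PySem.Int.mod_eq_emod_of_pos, PySem.Int.mod_eq_emod_of_pos]
        · omega
        · norm_num
        · norm_num
      rw [hfd2, hdiv, hmod]
      simp

-- the element of lvl k at position p is its half-word followed by the mirror
lemma lvl_get (k : Nat) : ∀ p : Int, 0 ≤ p → p < 2 ^ (k + 1) →
    PySem.List.pyGet? (lvl k) p = some (String.ofList (hc p (k + 1) ++ (hc p (k + 1)).reverse)) := by
  induction k with
  | zero =>
    intro p h0 h1
    interval_cases p <;> decide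
  | succ k ih =>
    intro p h0 h1
    rw [PySem.List.pyGet?_of_nonneg _ h0]
    rw [hc_msb (k + 1) p h0 h1]
    have hlen : ((lvl k).map (fun a => "4" ++ a ++ "4")).length = 2 ^ (k + 1) := by
      simp [lvl_length]
    have hcast : ((2 ^ (k + 1) : Nat) : Int) = 2 ^ (k + 1) := by push_cast; ring
    by_cases hp : p < 2 ^ (k + 1)
    · have hn : p.toNat < ((lvl k).map (fun a => "4" ++ a ++ "4")).length := by
        rw [hlen]; omega
      rw [show lvl (k + 1) = (lvl k).map (fun a => "4" ++ a ++ "4") ++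
        (lvl k).map (fun a => "5" ++ a ++ "5") from rfl]
      rw [List.getElem?_append_left hn, List.getElem?_map]
      have := ih p h0 hp
      rw [PySem.List.pyGet?_of_nonneg _ h0] at this
      rw [this]
      simp only [hp, if_true, Option.map_some]
      congr 1
      apply String.toList_inj.mp
      simp [String.toList_append]
    · have hge : ((lvl k).map (fun a => "4" ++ a ++ "4")).length ≤ p.toNat := by
        rw [hlen]; omega
      rw [show lvl (k + 1) = (lvl k).map (fun a => "4" ++ a ++ "4") ++
        (lvl k).map (fun a => "5" ++ a ++ "5") from rfl]
      rw [List.getElem?_append_right hge, List.getElem?_map]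
      have hps : (p.toNat - ((lvl k).map (fun a => "4" ++ a ++ "4")).length) = (p - 2 ^ (k + 1)).toNat := by
        rw [hlen]; omega
      rw [hps]
      have h0' : 0 ≤ p - 2 ^ (k + 1) := by omega
      have h1' : p - 2 ^ (k + 1) < 2 ^ (k + 1) := by
        have : (2 : Int) ^ (k + 2) = 2 * 2 ^ (k + 1) := by ring
        omega
      have := ih (p - 2 ^ (k + 1)) h0' h1'
      rw [PySem.List.pyGet?_of_nonneg _ h0'] at this
      rw [this]
      simp only [hp, if_false, Option.map_some]
      congr 1
      apply String.toList_inj.mp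
      simp [String.toList_append]

-- B's digit loop computes hc
lemma fold_hc (L : Nat) : ∀ (s : String) (p : Int),
    ((List.range L).foldl
      (fun (st : String × Int) _ =>
        ((if PySem.Int.mod st.2 2 == 1 then "5" else "4") ++ st.1, PySem.Int.floordiv st.2 2))
      (s, p)).1 = String.ofList (hc p L) ++ s := by
  induction L with
  | zero =>
    intro s p
    apply String.toList_inj.mp
    simp [hc]
  | succ L ih =>
    intro s p
    rw [List.range_succ_eq_map]
    simp only [List.foldl_cons, List.foldl_map]
    rw [ih]
    apply String.toList_inj.mp
    simp [hc, String.toList_append]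
    split_ifs <;> rfl

-- result of B's level search
lemma findLevel_run (d : Nat) : ∀ (L : Nat) (N : Int), N ≤ 2 ^ (L + 1 + d) - 2 →
    ∃ K : Nat, L ≤ K ∧ findLevel N L (2 ^ (L + 1) - 2) = (K, 2 ^ (K + 1) - 2) ∧
      N ≤ 2 ^ (K + 1) - 2 ∧ (K = L ∨ 2 ^ K - 2 < N) := by
  induction d with
  | zero =>
    intro L N h
    simp only [Nat.add_zero] at h
    refine ⟨L, le_refl _, ?_, h, Or.inl rfl⟩
    rw [findLevel]
    simp [show ¬ (2 ^ (L + 1) - 2 < N) from by omega]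
  | succ d ih =>
    intro L N h
    by_cases hg : 2 ^ (L + 1) - 2 < N
    · have harg : 2 ^ (L + 1) - 2 + (2 : Int) ^ (L + 1) = 2 ^ (L + 1 + 1) - 2 := by ring
      have hb : N ≤ 2 ^ (L + 1 + 1 + d) - 2 := by
        have : L + 1 + 1 + d = L + 1 + (d + 1) := by omega
        rw [this]; exact h
      obtain ⟨K, hLK, heq, hK, hlast⟩ := ih (L + 1) N hb
      refine ⟨K, by omega, ?_, hK, ?_⟩
      · rw [findLevel]
        simp only [hg, if_true]
        rw [harg]
        exact heq
      · rcases hlast with h' | h'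
        · right; rw [h']; exact hg
        · right; exact h'
    · exact ⟨L, le_refl _, by rw [findLevel]; simp [hg], by omega, Or.inl rfl⟩

-- result of A's loop, stated through the final lookup
lemma pyGet?_prefix (as bs : List String) (i : Int) (h0 : 0 ≤ i) (h : i.toNat < as.length) :
    PySem.List.pyGet? (as ++ bs) i = PySem.List.pyGet? as i := by
  rw [PySem.List.pyGet?_of_nonneg _ h0, PySem.List.pyGet?_of_nonneg _ h0,
    List.getElem?_append_left h]

lemma loopA_run (d : Nat) : ∀ (k : Nat) (N start : Int),
    2 ^ (k + 2) - 2 < N → N ≤ 2 ^ (k + 2 + d) - 2 →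
    ∃ j : Nat, 2 ^ (j + 1) - 2 < N ∧ N ≤ 2 ^ (j + 2) - 2 ∧
      (PySem.List.pyGet? (solveLoopA N (lvl k) (2 ^ (k + 2) - 2) start).1
        (N - (solveLoopA N (lvl k) (2 ^ (k + 2) - 2) start).2 - 1)).getD ""
      = (PySem.List.pyGet? (lvl j) (N - (2 ^ (j + 1) - 2) - 1)).getD "" := by
  induction d with
  | zero =>
    intro k N start h1 h2
    simp only [Nat.add_zero] at h2
    omega
  | succ d ih =>
    intro k N start h1 h2
    have p1 : (2 : Int) ^ (k + 2) = 2 * 2 ^ (k + 1) := by ring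
    have p2 : (2 : Int) ^ (k + 3) = 2 * 2 ^ (k + 2) := by ring
    have p3 : (2 : Int) ^ (k + 1 + 2) = 2 * 2 ^ (k + 2) := by ring
    have hlen4 : ((((lvl k).map (fun a => "4" ++ a ++ "4")).length : Nat) : Int) = 2 ^ (k + 1) := by
      simp [lvl_length]
    have hlen2 : (((((lvl k).map (fun a => "4" ++ a ++ "4")) ++
        ((lvl k).map (fun a => "5" ++ a ++ "5"))).length : Nat) : Int) = 2 ^ (k + 2) := by
      simp [lvl_length]; ring
    rw [solveLoopA, dif_pos ⟨h1, lvl_ne_nil k⟩]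
    simp only [hlen4, hlen2]
    by_cases hb : 2 ^ (k + 2) - 2 + (2 : Int) ^ (k + 1) ≥ N
    · rw [if_pos hb]
      refine ⟨k + 1, by omega, by omega, ?_⟩
      congr 1
      have hidx0 : (0 : Int) ≤ N - (2 ^ (k + 2) - 2) - 1 := by omega
      have hidx : (N - (2 ^ (k + 2) - 2) - 1).toNat <
          ((lvl k).map (fun a => "4" ++ a ++ "4")).length := by
        have := hlen4; omega
      rw [show (2 : Int) ^ (k + 1 + 1) = 2 ^ (k + 2) from rfl]
      rw [show lvl (k + 1) = (lvl k).map (fun a => "4" ++ a ++ "4") ++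
        (lvl k).map (fun a => "5" ++ a ++ "5") from rfl]
      rw [pyGet?_prefix _ _ _ hidx0 hidx]
    · rw [if_neg hb]
      have harr : (lvl k).map (fun a => "4" ++ a ++ "4") ++
          (lvl k).map (fun a => "5" ++ a ++ "5") = lvl (k + 1) := rfl
      have hi : 2 ^ (k + 2) - 2 + (2 : Int) ^ (k + 2) = 2 ^ (k + 3) - 2 := by ring
      rw [harr, hi]
      by_cases hc2 : 2 ^ (k + 3) - 2 < N
      · have hE : k + 1 + 2 + d = k + 2 + (d + 1) := by omega
        have hb' : N ≤ 2 ^ (k + 1 + 2 + d) - 2 := by rw [hE]; exact h2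
        have := ih (k + 1) N (2 ^ (k + 2) - 2) (by
          rw [show (2 : Int) ^ (k + 1 + 2) = 2 ^ (k + 3) from rfl]; exact hc2) hb'
        rw [show (2 : Int) ^ (k + 1 + 2) = 2 ^ (k + 3) from rfl] at this
        exact this
      · rw [solveLoopA, dif_neg (fun hcon => hc2 hcon.1)]
        exact ⟨k + 1, h1, by omega, rfl⟩

-- the bracket 2^(j+1)-2 < N ≤ 2^(j+2)-2 determines j
lemma bracket_unique (j1 j2 : Nat) (N : Int)
    (h1 : 2 ^ (j1 + 1) - 2 < N) (h2 : N ≤ 2 ^ (j1 + 2) - 2)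
    (h3 : 2 ^ (j2 + 1) - 2 < N) (h4 : N ≤ 2 ^ (j2 + 2) - 2) : j1 = j2 := by
  by_contra hne
  rcases Nat.lt_or_ge j1 j2 with h | h
  · have : (2 : Int) ^ (j1 + 2) ≤ 2 ^ (j2 + 1) := by
      apply pow_le_pow_right₀ (by norm_num); omega
    omega
  · have hlt : j2 < j1 := by omega
    have : (2 : Int) ^ (j2 + 2) ≤ 2 ^ (j1 + 1) := by
      apply pow_le_pow_right₀ (by norm_num); omega
    omega

-- ===== VERDICT (by name: the statement is the Claim_ definition above) =====
theorem Solve_spec : Claim_equal_Solve := by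
  intro N hdom hpre
  unfold Spec_Solve
  have hm1 : (-1 : Int) ≤ N := hpre
  by_cases hN : N ≤ 2
  · interval_cases N
    all_goals (simp only [Solve, Solve_alt]; rw [findLevel]; norm_num; try decide)
  · have h3 : (3 : Int) ≤ N := by omega

    have hDom : N ≤ 2147483648 := by
      simp [Dom_Solve, pvDomInt] at hdom; omega
    -- A side
    obtain ⟨j, hj1, hj2, hjeq⟩ := loopA_run 31 0 N 1 (by norm_num; omega) (by norm_num; omega)
    norm_num at hjeq
    -- B side
    obtain ⟨K, hK1, hKeq, hKle, hKlast⟩ := findLevel_run 31 1 N (by norm_num; omega)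
    norm_num at hKeq
    have hKge2 : 2 ≤ K := by
      rcases hKlast with h | h
      · subst h; norm_num at hKle; omega
      · by_contra hlt
        interval_cases K <;> (norm_num at hKle; omega)
    have hbr1 : 2 ^ K - 2 < N := by
      rcases hKlast with h | h
      · omega
      · exact h
    have hKsub : K - 1 + 1 = K := by omega
    have hKsub2 : K - 1 + 2 = K + 1 := by omega
    have hpowK : (2 : Int) ^ (K + 1) = 2 * 2 ^ K := by ring
    have hjK : j = K - 1 := by
      apply bracket_unique j (K - 1) N hj1 hj2
      · rw [hKsub]; exact hbr1
      · rw [hKsub2]; omega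
    subst hjK
    rw [hKsub] at hjeq
    -- unfold Solve
    show Solve N = Solve_alt N
    unfold Solve
    rw [if_neg (by omega)]
    show (PySem.List.pyGet? (solveLoopA N (lvl 0) 2 1).1
      (N - (solveLoopA N (lvl 0) 2 1).2 - 1)).getD "" = Solve_alt N
    rw [hjeq]
    unfold Solve_alt
    rw [hKeq]
    show _ = ((List.range K).foldl _ ("", N - (2 ^ (K + 1) - 2 - 2 ^ K) - 1)).1 ++ _
    rw [fold_hc]
    rw [PySem.Str.slice?_none_none_neg_one]
    have hidx : N - (2 ^ (K + 1) - 2 - 2 ^ K) - 1 = N - (2 ^ K - 2) - 1 := by omega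
    rw [hidx]
    set p := N - (2 ^ K - 2) - 1 with hp
    have hp0 : 0 ≤ p := by omega
    have hp1 : p < 2 ^ (K - 1 + 1) := by rw [hKsub]; omega
    rw [lvl_get (K - 1) p hp0 hp1, hKsub]
    simp only [Option.getD_some]
    apply String.toList_inj.mp
    simp
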